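-- pv_equiv track=rewrite | github.com/dtudk/omb | driver/omb-analyzer.py | _remove_indices
-- ===== SOURCE A (Python) =====
-- def _remove_indices(values, idxs: list[int]) -> list:
--     if not idxs:
--         return values
--     if not isinstance(values, tuple):
--         values = (values,)
--     new_v = []
--     for i, v in enumerate(values):
--         if i not in idxs:
--             new_v.append(v)
--     return new_v
-- ===== SOURCE B (Python) =====
-- def _remove_indices(values, idxs: list[int]) -> list:
--     if not idxs:
--         return values
--     if not isinstance(values, tuple):
--         values = (values,)
--     new_v = list(values)
--     for i in sorted(set(idxs), reverse=True):
--         if 0 <= i < len(new_v):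
--             del new_v[i]
--     return new_v
-- ===== Notes on version B (the rewrite author's own statement) =====
-- stated objective: faster
-- what changed: B keeps the two guards but loops over the deduplicated removal indices in descending order, deleting in place from a mutable copy, instead of scanning every element with a linear 'i not in idxs' membership test.
import Mathlib
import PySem

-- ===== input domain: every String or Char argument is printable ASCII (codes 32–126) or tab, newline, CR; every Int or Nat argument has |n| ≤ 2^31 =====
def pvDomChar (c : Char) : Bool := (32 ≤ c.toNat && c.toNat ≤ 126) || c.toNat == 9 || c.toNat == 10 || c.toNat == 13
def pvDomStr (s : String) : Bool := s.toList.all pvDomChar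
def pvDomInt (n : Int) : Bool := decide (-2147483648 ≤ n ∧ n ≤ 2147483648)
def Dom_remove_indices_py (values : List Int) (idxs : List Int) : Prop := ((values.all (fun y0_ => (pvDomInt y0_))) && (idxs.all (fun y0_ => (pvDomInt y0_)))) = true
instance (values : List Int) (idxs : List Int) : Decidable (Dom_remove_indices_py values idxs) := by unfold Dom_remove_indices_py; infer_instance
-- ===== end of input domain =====

-- B replaces A's per-element 'i not in idxs' scan by deleting each deduplicated removal index,
-- in descending order, from a mutable copy of values (alternative decomposition).


-- ===== PORT A =====
-- values arrives as a Python tuple (so the isinstance-wrap branch never fires and is dropped);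
-- the loop appends each enumerated element whose index is not in idxs.
def remove_indices_py (values : List Int) (idxs : List Int) : List Int :=
  if idxs = [] then values
  else
    (PySem.List.enumerate values).foldl
      (fun acc iv => if idxs.contains iv.1 then acc else acc ++ [iv.2]) []

-- ===== PORT B =====
-- del new_v[i] guarded by 0 <= i < len(new_v)
def delStep (nv : List Int) (i : Int) : List Int :=
  if 0 ≤ i ∧ i < (nv.length : Int) then nv.eraseIdx i.toNat else nv

-- same guards as A; then delete each index of sorted(set(idxs), reverse=True) that is in range
-- from the shrinking copy new_v = list(values).
def remove_indices_py_alt (values : List Int) (idxs : List Int) : List Int :=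
  if idxs = [] then values
  else
    (PySem.List.sorted (PySem.Set.ofList idxs) (fun x => x) true).foldl delStep values

-- ===== PRECONDITION & SPEC =====
def Spec_remove_indices_py (values : List Int) (idxs : List Int) (out : List Int) : Prop := out = remove_indices_py_alt values idxs
instance (values : List Int) (idxs : List Int) (out : List Int) : Decidable (Spec_remove_indices_py values idxs out) := by unfold Spec_remove_indices_py; infer_instance

-- ===== CLAIM (what is proved, stated in full; the proofs are below) =====
def Claim_equal_remove_indices_py : Prop := ∀ (values : List Int) (idxs : List Int), Dom_remove_indices_py values idxs → Spec_remove_indices_py values idxs (remove_indices_py values idxs)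

-- ===== LEMMAS AND PROOFS =====

-- A's append loop is a filter on the enumerated list.
theorem afold_eq_filter (idxs : List Int) (l : List (Int × Int)) (acc : List Int) :
    l.foldl (fun acc iv => if idxs.contains iv.1 then acc else acc ++ [iv.2]) acc
      = acc ++ (l.filter (fun iv => !idxs.contains iv.1)).map (·.2) := by
  induction l generalizing acc with
  | nil => simp
  | cons hd tl ih =>
    simp only [List.foldl_cons, List.filter_cons]
    by_cases h : idxs.contains hd.1
    · rw [if_pos h, ih, h]; simp
    · rw [if_neg h, ih, Bool.not_eq_true] at *
      rw [h]; simp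

-- filtering by a predicate true on every enumerated pair keeps everything
theorem filter_enumerate_all (xs : List Int) (s : Int) (q : Int × Int → Bool)
    (h : ∀ p ∈ PySem.List.enumerate xs s, q p = true) :
    ((PySem.List.enumerate xs s).filter q).map (·.2) = xs := by
  rw [List.filter_eq_self.mpr h, PySem.List.map_snd_enumerate]

-- Descending-order in-range deletion = filtering out the member indices.
theorem del_eq_filter (ds : List Int) (v : List Int)
    (hp : ds.Pairwise (fun a b => b < a)) :
    ds.foldl delStep v
      = ((PySem.List.enumerate v).filter (fun iv => !ds.contains iv.1)).map (·.2) := by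
  induction ds generalizing v with
  | nil =>
    exact (filter_enumerate_all v 0 _ (by intro p _; simp)).symm
  | cons d ds ih =>
    have hlt : ∀ x ∈ ds, x < d := fun x hx => (List.pairwise_cons.mp hp).1 x hx
    have hp' : ds.Pairwise (fun a b => b < a) := (List.pairwise_cons.mp hp).2
    simp only [List.foldl_cons]
    by_cases hin : 0 ≤ d ∧ d < (v.length : Int)
    · -- in range: d = (n : Int) with n < v.length
      obtain ⟨n, rfl⟩ : ∃ n : Nat, d = (n : Int) := ⟨d.toNat, (Int.toNat_of_nonneg hin.1).symm⟩
      have hn : n < v.length := by exact_mod_cast hin.2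
      rw [show delStep v (n : Int) = v.eraseIdx n by
            simp [delStep, hin, Int.toNat_natCast], ih _ hp']
      have hv : v = v.take n ++ v[n] :: v.drop (n + 1) := by
        conv_lhs => rw [← List.take_append_drop n v, ← List.getElem_cons_drop hn]
      have hlen : (v.take n).length = n := by simp [Nat.min_eq_left (Nat.le_of_lt hn)]
      have htail : ∀ (s : Int), (n : Int) ≤ s → ∀ p ∈ PySem.List.enumerate (v.drop (n+1)) s,
          (!ds.contains p.1) = true := by
        intro s hs p hpmem
        rcases (PySem.List.mem_enumerate_iff _ _ _).mp hpmem with ⟨k, hk, rfl⟩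
        simp only [Bool.not_eq_eq_eq_not, Bool.not_true, List.contains_eq_mem,
          decide_eq_false_iff_not]
        intro hmem
        have := hlt _ hmem
        omega
      have htail2 : ∀ (s : Int), (n : Int) < s → ∀ p ∈ PySem.List.enumerate (v.drop (n+1)) s,
          (!List.contains ((n : Int) :: ds) p.1) = true := by
        intro s hs p hpmem
        rcases (PySem.List.mem_enumerate_iff _ _ _).mp hpmem with ⟨k, hk, rfl⟩
        simp only [List.contains_cons]
        have h1 : ((s + (k : Int)) == (n : Int)) = false := by simp; omega
        rw [h1]
        simp only [Bool.false_or, Bool.not_eq_eq_eq_not, Bool.not_true,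
          List.contains_eq_mem, decide_eq_false_iff_not]
        intro hmem
        have := hlt _ hmem
        omega
      have hhead : ∀ a ∈ PySem.List.enumerate (v.take n) 0,
          (!ds.contains a.1) = (!List.contains ((n : Int) :: ds) a.1) := by
        intro a ha
        rcases (PySem.List.mem_enumerate_iff _ _ _).mp ha with ⟨k, hk, rfl⟩
        have hkn : k < n := by simpa [hlen] using hk
        simp only [List.contains_cons]
        have h1 : ((0 + (k : Int)) == (n : Int)) = false := by simp; omega
        rw [h1]; simp
      have e1 := filter_enumerate_all (v.drop (n+1)) (0 + (n : Int))
        (fun iv => !ds.contains iv.1) (htail _ (by omega))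
      have e2 := filter_enumerate_all (v.drop (n+1)) (0 + (n : Int) + 1)
        (fun iv => !List.contains ((n : Int) :: ds) iv.1) (htail2 _ (by omega))
      calc ((PySem.List.enumerate (v.eraseIdx n)).filter (fun iv => !ds.contains iv.1)).map (·.2)
          = ((PySem.List.enumerate (v.take n) 0).filter (fun iv => !ds.contains iv.1)).map (·.2)
              ++ ((PySem.List.enumerate (v.drop (n+1)) (0 + (v.take n).length)).filter
                  (fun iv => !ds.contains iv.1)).map (·.2) := by
            rw [List.eraseIdx_eq_take_drop_succ, PySem.List.enumerate_append]; simp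
        _ = ((PySem.List.enumerate (v.take n) 0).filter (fun iv => !ds.contains iv.1)).map (·.2)
              ++ v.drop (n+1) := by rw [hlen, e1]
        _ = ((PySem.List.enumerate (v.take n) 0).filter
              (fun iv => !List.contains ((n : Int) :: ds) iv.1)).map (·.2) ++ v.drop (n+1) := by
            rw [List.filter_congr hhead]
        _ = ((PySem.List.enumerate v).filter
              (fun iv => !List.contains ((n : Int) :: ds) iv.1)).map (·.2) := by
            conv_rhs => rw [hv]
            rw [PySem.List.enumerate_append, List.filter_append, List.map_append, hlen,
              PySem.List.enumerate_cons]
            congr 1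
            have hself : (!List.contains ((n : Int) :: ds) ((0 : Int) + (n : Int))) = false := by
              simp
            rw [List.filter_cons, hself]
            simp only [Bool.false_eq_true, if_false]
            rw [e2]
    · -- out of range: delStep is the identity, and d never matches an enumerated index
      rw [show delStep v d = v by simp [delStep, hin], ih _ hp']
      apply congrArg
      apply List.filter_congr
      intro a ha
      rcases (PySem.List.mem_enumerate_iff _ _ _).mp ha with ⟨k, hk, rfl⟩
      simp only [List.contains_cons]
      have h1 : ((0 + (k : Int)) == d) = false := by
        simp only [beq_eq_false_iff_ne, ne_eq]
        intro he
        apply hin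
        constructor <;> [omega; (rw [← he]; push_cast; omega)]
      rw [h1]; simp

-- the sorted deduplicated index list is strictly decreasing
theorem sorted_set_desc (idxs : List Int) :
    (PySem.List.sorted (PySem.Set.ofList idxs) (fun x => x) true).Pairwise (fun a b => b < a) := by
  have h1 := PySem.List.sorted_pairwise_rev (xs := PySem.Set.ofList idxs) (key := fun x => x)
  have h2 : (PySem.List.sorted (PySem.Set.ofList idxs) (fun x => x) true).Nodup :=
    ((PySem.List.sorted_perm (PySem.Set.ofList idxs) (fun x => x) true).nodup_iff).mpr
      (PySem.Set.nodup_ofList idxs)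
  exact (h1.and h2).imp (fun h => by omega)

-- membership in sorted(set(idxs)) is membership in idxs
theorem contains_sorted_set (idxs : List Int) (x : Int) :
    (PySem.List.sorted (PySem.Set.ofList idxs) (fun y => y) true).contains x = idxs.contains x := by
  simp only [List.contains_eq_mem]
  exact decide_eq_decide.mpr (by rw [PySem.List.mem_sorted]; simp [PySem.Set.mem_ofList])

-- ===== VERDICT (by name: the statement is the Claim_ definition above) =====
theorem remove_indices_py_spec : Claim_equal_remove_indices_py := by
  intro values idxs _
  unfold Spec_remove_indices_py remove_indices_py remove_indices_py_alt
  by_cases h : idxs = []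
  · simp [h]
  · rw [if_neg h, if_neg h, afold_eq_filter, del_eq_filter _ _ (sorted_set_desc idxs)]
    simp only [List.nil_append]
    apply congrArg
    apply List.filter_congr
    intro a _
    rw [contains_sorted_set]
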